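-- pv_equiv track=rewrite | github.com/eliottcassidy2000/math | 04-computation/disj3_general_test.py | overlap_analysis
-- ===== SOURCE A (Python) =====
-- def overlap_analysis(c3_sets):
--     n3 = len(c3_sets)
--     disj = 0
--     ov1 = 0
--     ov2 = 0
--     for i in range(n3):
--         for j in range(i+1, n3):
--             o = len(c3_sets[i] & c3_sets[j])
--             if o == 0:
--                 disj += 1
--             elif o == 1:
--                 ov1 += 1
--             elif o == 2:
--                 ov2 += 1
--     return disj, ov1, ov2
-- ===== SOURCE B (Python) =====
-- def overlap_analysis(c3_sets):
--     # Inverted index: element -> indices of earlier sets containing it.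
--     # Each shared element bumps a per-pair counter, so only pairs that
--     # actually share an element are touched; disjoint pairs are counted
--     # by subtraction from the total number of pairs.
--     index = {}
--     counts = {}
--     j = 0
--     for s in c3_sets:
--         for x in s:
--             for i in index.get(x, []):
--                 counts[(i, j)] = counts.get((i, j), 0) + 1
--             index.setdefault(x, []).append(j)
--         j += 1
--     ov1 = 0
--     ov2 = 0
--     for c in counts.values():
--         if c == 1:
--             ov1 += 1
--         elif c == 2:
--             ov2 += 1
--     n = len(c3_sets)
--     disj = n * (n - 1) // 2 - len(counts)
--     return disj, ov1, ov2
-- ===== Notes on version B (the rewrite author's own statement) =====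
-- stated objective: alternative
-- what changed: Replaced the all-pairs double loop with an inverted index (element -> earlier sets containing it) feeding a per-pair overlap counter, so only pairs that actually share an element are touched; exact-overlap-1/2 counts are read off the counter values and the disjoint count is obtained by subtracting the overlapping pairs from n*(n-1)//2.
import Mathlib
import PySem

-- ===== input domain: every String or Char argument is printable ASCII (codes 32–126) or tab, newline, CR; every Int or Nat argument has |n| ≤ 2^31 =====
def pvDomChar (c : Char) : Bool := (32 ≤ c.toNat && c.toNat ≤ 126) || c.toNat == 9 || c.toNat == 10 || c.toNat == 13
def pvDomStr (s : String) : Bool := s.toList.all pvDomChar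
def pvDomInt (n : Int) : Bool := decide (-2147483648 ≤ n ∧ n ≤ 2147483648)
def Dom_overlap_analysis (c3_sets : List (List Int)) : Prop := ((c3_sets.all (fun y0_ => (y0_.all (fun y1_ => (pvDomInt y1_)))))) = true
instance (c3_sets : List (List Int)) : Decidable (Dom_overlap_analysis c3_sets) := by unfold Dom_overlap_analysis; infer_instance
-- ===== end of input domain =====

-- B replaces A's all-pairs scan by an inverted index (element -> earlier sets containing it)
-- feeding a per-pair overlap counter, recovering the disjoint count from n*(n-1)//2
-- (a different algorithm: only pairs that actually share an element are touched).

-- ===== PORT A =====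
-- len(a & b) on Python sets = number of (distinct) elements of a that are also in b;
-- exact on the set model (inner lists hold distinct elements, see Pre_).
def overlap_analysis (c3_sets : List (List Int)) : List Int :=
  let n3 : Int := PySem.List.len c3_sets
  let st := (PySem.List.pyRange 0 n3 1).foldl (fun st i =>
    (PySem.List.pyRange (i + 1) n3 1).foldl (fun st j =>
      let o := (((PySem.List.pyGet? c3_sets i).getD []).filter
                  (fun x => ((PySem.List.pyGet? c3_sets j).getD []).contains x)).length
      if o = 0 then (st.1 + 1, st.2.1, st.2.2)
      else if o = 1 then (st.1, st.2.1 + 1, st.2.2)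
      else if o = 2 then (st.1, st.2.1, st.2.2 + 1)
      else st) st) ((0 : Int), (0 : Int), (0 : Int))
  [st.1, st.2.1, st.2.2]

-- ===== PORT B =====
-- the body of B's inner loop (one element x of the set with index j)
def bElem (j : Int) (p : PySem.Dict Int (List Int) × PySem.Dict (Int × Int) Int) (x : Int) :
    PySem.Dict Int (List Int) × PySem.Dict (Int × Int) Int :=
  let counts := (p.1.getD x []).foldl
    (fun c i => c.insert (i, j) (c.getD (i, j) 0 + 1)) p.2
  let index := p.1.modify x [] (fun l => l ++ [j])
  (index, counts)

-- the body of B's outer loop (one set s, current index st.1)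
def bSet (st : Int × PySem.Dict Int (List Int) × PySem.Dict (Int × Int) Int) (s : List Int) :
    Int × PySem.Dict Int (List Int) × PySem.Dict (Int × Int) Int :=
  let inner := s.foldl (bElem st.1) (st.2.1, st.2.2)
  (st.1 + 1, inner.1, inner.2)

def overlap_analysis_alt (c3_sets : List (List Int)) : List Int :=
  let st := c3_sets.foldl bSet ((0 : Int), PySem.Dict.empty, PySem.Dict.empty)
  let counts := st.2.2
  let ov := counts.values.foldl
    (fun (p : Int × Int) c =>
      if c = 1 then (p.1 + 1, p.2) else if c = 2 then (p.1, p.2 + 1) else p)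
    ((0 : Int), (0 : Int))
  let n : Int := PySem.List.len c3_sets
  [PySem.Int.floordiv (n * (n - 1)) 2 - PySem.Dict.size counts, ov.1, ov.2]

-- ===== PRECONDITION & SPEC =====
-- The Python argument is a list of SETS: under the type convention a set is a list of
-- DISTINCT elements, so Pre_ states exactly that shape (no other input reaches A).
def Pre_overlap_analysis (c3_sets : List (List Int)) : Prop :=
  ∀ s ∈ c3_sets, s.Nodup
instance (c3_sets : List (List Int)) : Decidable (Pre_overlap_analysis c3_sets) := by
  unfold Pre_overlap_analysis; infer_instance

def pvWitness_overlap_analysis : List (List Int) := [[1, 2], [2, 3], [5]]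

def Spec_overlap_analysis (c3_sets : List (List Int)) (out : List Int) : Prop :=
  out = overlap_analysis_alt c3_sets
instance (c3_sets : List (List Int)) (out : List Int) :
    Decidable (Spec_overlap_analysis c3_sets out) := by
  unfold Spec_overlap_analysis; infer_instance

-- ===== CLAIM (what is proved, stated in full; the proofs are below) =====
def Claim_equal_overlap_analysis : Prop :=
  ∀ (c3_sets : List (List Int)), Dom_overlap_analysis c3_sets →
    Pre_overlap_analysis c3_sets →
    Spec_overlap_analysis c3_sets (overlap_analysis c3_sets)

-- ===== LEMMAS AND PROOFS =====

-- Proof-side abbreviations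
def pvSet (A : List (List Int)) (i : Nat) : List Int := A.getD i []

def pvCnt (A : List (List Int)) (j i : Nat) : Nat :=
  (pvSet A j).countP (fun x => (pvSet A i).contains x)

def pvPairs (n : Nat) : List (Nat × Nat) :=
  (List.range n).flatMap (fun j => (List.range j).map (fun i => (i, j)))

def pvPairsA (n : Nat) : List (Nat × Nat) :=
  (List.range n).flatMap (fun i => (List.range (n - (i + 1))).map (fun t => (i, i + 1 + t)))

def pvIdx (A : List (List Int)) (k : Nat) (x : Int) : List Int :=
  ((List.range k).filter (fun i => (pvSet A i).contains x)).map (fun i => ((i : Nat) : Int))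

lemma mem_pvPairs (n : Nat) (p : Nat × Nat) :
    p ∈ pvPairs n ↔ p.1 < p.2 ∧ p.2 < n := by
  rcases p with ⟨i, j⟩
  simp only [pvPairs, List.mem_flatMap, List.mem_map, List.mem_range]
  constructor
  · rintro ⟨j', hj', i', hi', h⟩
    obtain ⟨rfl, rfl⟩ := Prod.mk.injEq i' j' i j ▸ h
    exact ⟨hi', hj'⟩
  · rintro ⟨h1, h2⟩
    exact ⟨j, h2, i, h1, rfl⟩

lemma nodup_pvPairs (n : Nat) : (pvPairs n).Nodup := by
  rw [pvPairs, List.nodup_flatMap]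
  refine ⟨fun j _ => List.Nodup.map (fun a b h => by simpa using congrArg Prod.fst h)
      List.nodup_range, ?_⟩
  refine List.Pairwise.imp ?_ (List.pairwise_lt_range (n := n))
  intro a b hab p hpa hpb
  simp only [List.mem_map, List.mem_range] at hpa hpb
  obtain ⟨i, _, rfl⟩ := hpa
  obtain ⟨i', _, h⟩ := hpb
  exact absurd (congrArg Prod.snd h).symm (by simpa using hab.ne)

lemma mem_pvPairsA (n : Nat) (p : Nat × Nat) :
    p ∈ pvPairsA n ↔ p.1 < p.2 ∧ p.2 < n := by
  rcases p with ⟨i, j⟩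
  simp only [pvPairsA, List.mem_flatMap, List.mem_map, List.mem_range]
  constructor
  · rintro ⟨i', hi', t, ht, h⟩
    obtain ⟨rfl, rfl⟩ := Prod.mk.injEq i' (i' + 1 + t) i j ▸ h
    omega
  · rintro ⟨h1, h2⟩
    exact ⟨i, by omega, j - i - 1, by omega, by simp; omega⟩

lemma nodup_pvPairsA (n : Nat) : (pvPairsA n).Nodup := by
  rw [pvPairsA, List.nodup_flatMap]
  refine ⟨fun i _ => List.Nodup.map (fun a b h => by simpa using congrArg Prod.snd h)
      List.nodup_range, ?_⟩
  refine List.Pairwise.imp ?_ (List.pairwise_lt_range (n := n))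
  intro a b hab p hpa hpb
  simp only [List.mem_map, List.mem_range] at hpa hpb
  obtain ⟨t, _, rfl⟩ := hpa
  obtain ⟨t', _, h⟩ := hpb
  exact absurd (congrArg Prod.fst h).symm (by simpa using hab.ne)

lemma pvPairsA_perm (n : Nat) : (pvPairsA n).Perm (pvPairs n) := by
  refine (List.perm_ext_iff_of_nodup (nodup_pvPairsA n) (nodup_pvPairs n)).mpr ?_
  intro p; rw [mem_pvPairsA, mem_pvPairs]

-- countP-based symmetry of intersection size for duplicate-free lists
lemma pvSet_nodup (A : List (List Int)) (hA : ∀ s ∈ A, s.Nodup) (i : Nat) :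
    (pvSet A i).Nodup := by
  unfold pvSet
  rw [List.getD_eq_getElem?_getD]
  rcases h : A[i]? with _ | s
  · simp
  · simpa using hA s (List.mem_of_getElem? h)

lemma pvCnt_symm (A : List (List Int)) (hA : ∀ s ∈ A, s.Nodup) (i j : Nat) :
    pvCnt A i j = pvCnt A j i := by
  unfold pvCnt
  rw [List.countP_eq_length_filter, List.countP_eq_length_filter]
  apply List.Perm.length_eq
  refine (List.perm_ext_iff_of_nodup ((pvSet_nodup A hA i).filter _)
      ((pvSet_nodup A hA j).filter _)).mpr ?_
  intro x
  simp only [List.mem_filter, List.contains_iff_mem]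
  exact and_comm

-- A's classification loop over any list counts each class
lemma tripleFold {α : Type} (L : List α) (f : α → Nat) (a b c : Int) :
    L.foldl (fun st x =>
      if f x = 0 then (st.1 + 1, st.2.1, st.2.2)
      else if f x = 1 then (st.1, st.2.1 + 1, st.2.2)
      else if f x = 2 then (st.1, st.2.1, st.2.2 + 1)
      else st) (a, b, c)
    = (a + (L.countP (fun x => f x = 0) : Int),
       b + (L.countP (fun x => f x = 1) : Int),
       c + (L.countP (fun x => f x = 2) : Int)) := by
  induction L generalizing a b c with
  | nil => simp
  | cons x t ih =>
    rw [List.foldl_cons]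
    split_ifs with h0 h1 h2
    · simp [ih, h0, Prod.ext_iff]; omega
    · simp [ih, h1, Prod.ext_iff]; omega
    · simp [ih, h2, Prod.ext_iff]; omega
    · simp [ih, h0, h1, h2]

-- B's value-classification loop
lemma pairFold (L : List Int) (a b : Int) :
    L.foldl (fun p c =>
      if c = 1 then (p.1 + 1, p.2) else if c = 2 then (p.1, p.2 + 1) else p) (a, b)
    = (a + (L.countP (fun c => c = 1) : Int), b + (L.countP (fun c => c = 2) : Int)) := by
  induction L generalizing a b with
  | nil => simp
  | cons x t ih =>
    rw [List.foldl_cons]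
    split_ifs with h0 h1
    · simp [ih, h0, Prod.ext_iff]; omega
    · simp [ih, h1, Prod.ext_iff]; omega
    · simp [ih, h0, h1]

lemma pyRange_succ_nat (i n : Nat) :
    PySem.List.pyRange ((i : Int) + 1) (n : Int) 1
      = (List.range (n - (i + 1))).map (fun t => ((i + 1 + t : Nat) : Int)) := by
  rw [PySem.List.pyRange_of_pos _ _ (by norm_num : (0:Int) < 1)]
  have hif : (if (i : Int) + 1 < (n : Int)
      then ((((n : Int)) - ((i : Int) + 1) + 1 - 1) / 1).toNat else 0) = n - (i + 1) := by
    split_ifs with h <;> omega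
  rw [hif]
  apply List.map_congr_left
  intro t _
  push_cast; ring

lemma tripleFold_flat (A : List (List Int)) (n : Nat) (L : List Nat) (a b c : Int) :
    L.foldl (fun st i =>
      (List.range (n - (i + 1))).foldl (fun st t =>
        if List.countP (fun x => (A.getD (i + 1 + t) []).contains x) (A.getD i []) = 0 then
          (st.1 + 1, st.2.1, st.2.2)
        else if List.countP (fun x => (A.getD (i + 1 + t) []).contains x) (A.getD i []) = 1 then
          (st.1, st.2.1 + 1, st.2.2)
        else if List.countP (fun x => (A.getD (i + 1 + t) []).contains x) (A.getD i []) = 2 then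
          (st.1, st.2.1, st.2.2 + 1)
        else st) st) (a, b, c)
    = (a + ((L.flatMap (fun i => (List.range (n - (i + 1))).map (fun t => (i, i + 1 + t)))).countP
          (fun p => pvCnt A p.1 p.2 = 0) : Int),
       b + ((L.flatMap (fun i => (List.range (n - (i + 1))).map (fun t => (i, i + 1 + t)))).countP
          (fun p => pvCnt A p.1 p.2 = 1) : Int),
       c + ((L.flatMap (fun i => (List.range (n - (i + 1))).map (fun t => (i, i + 1 + t)))).countP
          (fun p => pvCnt A p.1 p.2 = 2) : Int)) := by
  induction L generalizing a b c with
  | nil => simp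
  | cons i t ih =>
    rw [List.foldl_cons,
      tripleFold (f := fun t =>
        List.countP (fun x => (A.getD (i + 1 + t) []).contains x) (A.getD i [])), ih]
    simp only [List.flatMap_cons, List.countP_append, List.countP_map, Function.comp_def,
      Prod.ext_iff, pvCnt, pvSet]
    refine ⟨?_, ?_, ?_⟩ <;> · push_cast; ring_nf

-- characterization of A
lemma A_char (A : List (List Int)) :
    overlap_analysis A =
      [((pvPairsA A.length).countP (fun p => pvCnt A p.1 p.2 = 0) : Int),
       ((pvPairsA A.length).countP (fun p => pvCnt A p.1 p.2 = 1) : Int),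
       ((pvPairsA A.length).countP (fun p => pvCnt A p.1 p.2 = 2) : Int)] := by
  unfold overlap_analysis
  simp only [PySem.List.len_eq, PySem.List.pyRange_zero_natCast, List.foldl_map,
    pyRange_succ_nat, PySem.List.pyGet?_natCast, ← List.getD_eq_getElem?_getD,
    ← List.countP_eq_length_filter]
  rw [tripleFold_flat A A.length (List.range A.length) 0 0 0]
  simp [pvPairsA, pvCnt, pvSet]

-- B's per-element counter fold
lemma countsFold_getD (L : List Int) (w : Int) (c : PySem.Dict (Int × Int) Int) (q : Int × Int) :
    (L.foldl (fun c i => c.insert (i, w) (c.getD (i, w) 0 + 1)) c).getD q 0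
      = c.getD q 0 + (if q.2 = w then (L.count q.1 : Int) else 0) := by
  induction L generalizing c with
  | nil => simp
  | cons x t ih =>
    rcases q with ⟨a, b⟩
    rw [List.foldl_cons, ih, PySem.Dict.getD_insert]
    by_cases hb : b = w
    · subst hb
      by_cases ha : a = x
      · subst ha
        rw [if_pos rfl]
        simp only [List.count_cons_self]
        push_cast; ring
      · rw [if_neg (by simp [Prod.ext_iff]; omega)]
        simp [List.count_cons]
        omega
    · rw [if_neg (by simp [Prod.ext_iff]; intro _ h; exact hb h)]
      simp only [if_neg hb]

lemma countsFold_contains (L : List Int) (w : Int) (c : PySem.Dict (Int × Int) Int) (q : Int × Int) :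
    (L.foldl (fun c i => c.insert (i, w) (c.getD (i, w) 0 + 1)) c).contains q = true
      ↔ (q.2 = w ∧ q.1 ∈ L) ∨ c.contains q = true := by
  induction L generalizing c with
  | nil => simp
  | cons x t ih =>
    simp only [List.foldl_cons, ih, PySem.Dict.contains_insert, List.mem_cons]
    rcases q with ⟨a, b⟩
    constructor
    · rintro (⟨hb, ha⟩ | h)
      · exact Or.inl ⟨hb, Or.inr ha⟩
      · rcases Bool.or_eq_true_iff.mp h with h | h
        · have := eq_of_beq h
          cases this; exact Or.inl ⟨rfl, Or.inl rfl⟩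
        · exact Or.inr h
    · rintro (⟨hb, (ha | ha)⟩ | h)
      · subst hb; subst ha; right; simp
      · exact Or.inl ⟨hb, ha⟩
      · right; simp [h]
  -- (may need polish)


lemma count_pvIdx (A : List (List Int)) (k : Nat) (x : Int) (i : Nat) :
    (pvIdx A k x).count (i : Int)
      = (if i < k ∧ (pvSet A i).contains x = true then 1 else 0) := by
  have hnd : (pvIdx A k x).Nodup :=
    List.Nodup.map (fun a b h => by exact_mod_cast h)
      ((List.nodup_range).filter _)
  have hmem : ((i : Int) ∈ pvIdx A k x) ↔ (i < k ∧ (pvSet A i).contains x = true) := by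
    simp only [pvIdx, List.mem_map, List.mem_filter, List.mem_range]
    constructor
    · rintro ⟨i', ⟨hi', hc⟩, h⟩
      have : i' = i := by exact_mod_cast h
      subst this; exact ⟨hi', hc⟩
    · rintro ⟨h1, h2⟩; exact ⟨i, ⟨h1, h2⟩, rfl⟩
  split_ifs with h
  · exact List.count_eq_one_of_mem hnd (hmem.mpr h)
  · exact List.count_eq_zero.mpr (fun hm => h (hmem.mp hm))

lemma mem_pvIdx_elim (A : List (List Int)) (k : Nat) (x z : Int)
    (hz : z ∈ pvIdx A k x) :
    ∃ i : Nat, z = (i : Int) ∧ i < k ∧ (pvSet A i).contains x = true := by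
  simp only [pvIdx, List.mem_map, List.mem_filter, List.mem_range] at hz
  obtain ⟨i, ⟨h1, h2⟩, rfl⟩ := hz
  exact ⟨i, rfl, h1, h2⟩

-- inner-loop invariant: folding the remaining elements q of set number k
lemma bInner (A : List (List Int)) (k : Nat) :
    ∀ (q p : List Int), pvSet A k = p ++ q → (pvSet A k).Nodup →
    ∀ (idx : PySem.Dict Int (List Int)) (cnts : PySem.Dict (Int × Int) Int),
      (∀ x, idx.getD x [] = pvIdx A k x ++ (if x ∈ p then [(k : Int)] else [])) →
      (∀ i : Nat, i < k →
        cnts.getD ((i : Int), (k : Int)) 0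
          = (p.countP (fun x => (pvSet A i).contains x) : Int)) →
      (∀ i j : Nat, i < j → j < k →
        cnts.getD ((i : Int), (j : Int)) 0 = (pvCnt A j i : Int)) →
      (∀ r, cnts.contains r = true ↔
        (∃ i j : Nat, r = ((i : Int), (j : Int)) ∧ i < j ∧ j < k ∧ 0 < pvCnt A j i) ∨
        (∃ i : Nat, r = ((i : Int), (k : Int)) ∧ i < k ∧
          0 < p.countP (fun x => (pvSet A i).contains x))) →
      cnts.keys.Nodup →
      ( let res := q.foldl (bElem (k : Int)) (idx, cnts)
        (∀ x, res.1.getD x []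
            = pvIdx A k x ++ (if x ∈ pvSet A k then [(k : Int)] else [])) ∧
        (∀ i : Nat, i < k →
          res.2.getD ((i : Int), (k : Int)) 0 = (pvCnt A k i : Int)) ∧
        (∀ i j : Nat, i < j → j < k →
          res.2.getD ((i : Int), (j : Int)) 0 = (pvCnt A j i : Int)) ∧
        (∀ r, res.2.contains r = true ↔
          (∃ i j : Nat, r = ((i : Int), (j : Int)) ∧ i < j ∧ j < k ∧ 0 < pvCnt A j i) ∨
          (∃ i : Nat, r = ((i : Int), (k : Int)) ∧ i < k ∧ 0 < pvCnt A k i)) ∧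
        res.2.keys.Nodup ) := by
  intro q
  induction q with
  | nil =>
    intro p hpq hnd idx cnts hidx hc1 hc2 hcont hkeys
    have hp : p = pvSet A k := by simpa using hpq.symm
    subst hp
    refine ⟨?_, ?_, hc2, ?_, hkeys⟩
    · intro x; simpa using hidx x
    · intro i hi; simpa [pvCnt] using hc1 i hi
    · intro r; simpa [pvCnt] using hcont r
  | cons x q ih =>
    intro p hpq hnd idx cnts hidx hc1 hc2 hcont hkeys
    rw [List.foldl_cons]
    have hxp : x ∉ p := by
      have := hpq ▸ hnd
      exact fun hx => (List.disjoint_of_nodup_append this) hx (by simp)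
    have hidxx : idx.getD x [] = pvIdx A k x := by
      rw [hidx x, if_neg hxp, List.append_nil]
    -- the updated state
    have happ : pvSet A k = (p ++ [x]) ++ q := by simpa using hpq
    refine ih (p ++ [x]) happ hnd _ _ ?_ ?_ ?_ ?_ ?_
    · -- index after bElem
      intro y
      show ((idx.modify x [] (fun l => l ++ [(k : Int)])).getD y []) = _
      rw [PySem.Dict.getD_modify]
      by_cases hyx : y = x
      · subst hyx
        rw [if_pos rfl, hidxx, if_pos (by simp)]
      · rw [if_neg hyx, hidx y]
        have : (y ∈ p ++ [x]) ↔ y ∈ p := by simp [hyx]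
        simp [this]
    · -- partial counts at (i, k)
      intro i hi
      show ((idx.getD x []).foldl
          (fun c i => c.insert (i, (k : Int)) (c.getD (i, (k : Int)) 0 + 1)) cnts).getD _ 0 = _
      rw [hidxx, countsFold_getD, hc1 i hi]
      simp only [count_pvIdx, List.countP_append, List.countP_cons, List.countP_nil]
      by_cases hcx : (pvSet A i).contains x = true
      · simp [hi]
      · simp [hi]
    · -- old pairs unchanged
      intro i j hij hjk
      show ((idx.getD x []).foldl
          (fun c i => c.insert (i, (k : Int)) (c.getD (i, (k : Int)) 0 + 1)) cnts).getD _ 0 = _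
      rw [hidxx, countsFold_getD, hc2 i j hij hjk]
      have : ((i : Int), (j : Int)).2 ≠ (k : Int) := by
        simp only []; exact_mod_cast (by omega : j ≠ k)
      rw [if_neg this, add_zero]
    · -- contains
      intro r
      show ((idx.getD x []).foldl
          (fun c i => c.insert (i, (k : Int)) (c.getD (i, (k : Int)) 0 + 1)) cnts).contains r
          = true ↔ _
      rw [hidxx, countsFold_contains, hcont r]
      constructor
      · rintro (⟨h2, h1⟩ | h | h)
        · obtain ⟨i, hri, hik, hcx⟩ := mem_pvIdx_elim A k x r.1 h1
          right
          refine ⟨i, Prod.ext hri h2, hik, ?_⟩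
          have hxm : x ∈ pvSet A i := by simpa [List.contains_iff_mem] using hcx
          simp [List.countP_append, hxm]
        · exact Or.inl h
        · obtain ⟨i, hr, hik, hpos⟩ := h
          right
          refine ⟨i, hr, hik, ?_⟩
          simp only [List.countP_append]
          omega
      · rintro (h | ⟨i, hr, hik, hpos⟩)
        · exact Or.inr (Or.inl h)
        · simp only [List.countP_append, List.countP_cons, List.countP_nil] at hpos
          by_cases hcx : (pvSet A i).contains x = true
          · left
            subst hr
            refine ⟨rfl, ?_⟩
            have hcnt : 0 < (pvIdx A k x).count ((i : Nat) : Int) := by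
              rw [count_pvIdx, if_pos ⟨hik, hcx⟩]; omega
            simpa using List.count_pos_iff.mp hcnt
          · right; right
            refine ⟨i, hr, hik, ?_⟩
            simp only [Bool.not_eq_true] at hcx
            simp only [hcx] at hpos
            simpa using hpos
    · -- keys nodup
      exact PySem.Dict.nodup_keys_foldl_insert_key _ (fun i => (i, (k : Int))) _ _ hkeys

-- outer-loop invariant
lemma bOuter (A : List (List Int)) (hA : ∀ s ∈ A, s.Nodup) :
    ∀ (k : Nat) (idx : PySem.Dict Int (List Int)) (cnts : PySem.Dict (Int × Int) Int),
      k ≤ A.length →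
      (∀ x, idx.getD x [] = pvIdx A k x) →
      (∀ i j : Nat, i < j → j < k →
        cnts.getD ((i : Int), (j : Int)) 0 = (pvCnt A j i : Int)) →
      (∀ r, cnts.contains r = true ↔
        ∃ i j : Nat, r = ((i : Int), (j : Int)) ∧ i < j ∧ j < k ∧ 0 < pvCnt A j i) →
      cnts.keys.Nodup →
      ( let st := (A.drop k).foldl bSet ((k : Int), idx, cnts)
        (∀ i j : Nat, i < j → j < A.length →
          st.2.2.getD ((i : Int), (j : Int)) 0 = (pvCnt A j i : Int)) ∧
        (∀ r, st.2.2.contains r = true ↔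
          ∃ i j : Nat, r = ((i : Int), (j : Int)) ∧ i < j ∧ j < A.length ∧ 0 < pvCnt A j i) ∧
        st.2.2.keys.Nodup ) := by
  intro k
  induction hn : A.length - k generalizing k with
  | zero =>
    intro idx cnts hk hidx hc hcont hkeys
    have : A.drop k = [] := List.drop_eq_nil_iff.mpr (by omega)
    rw [this, List.foldl_nil]
    have hkl : k = A.length := by omega
    subst hkl
    exact ⟨hc, hcont, hkeys⟩
  | succ m ihm =>
    intro idx cnts hk hidx hc hcont hkeys
    have hklt : k < A.length := by omega
    obtain ⟨s, hs⟩ : ∃ s, A[k]? = some s := ⟨A[k], List.getElem?_eq_getElem hklt⟩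
    have hdrop : A.drop k = s :: A.drop (k + 1) := by
      rw [List.drop_eq_getElem_cons hklt]
      congr 1
      have := List.getElem?_eq_getElem hklt
      rw [this] at hs; exact (Option.some.injEq _ _ ▸ hs : _)
    have hsk : pvSet A k = s := by
      simp [pvSet, List.getD_eq_getElem?_getD, hs]
    have hsnd : s.Nodup := hA s (List.mem_of_getElem? hs)
    rw [hdrop, List.foldl_cons]
    -- apply the inner lemma with p = []
    have hinner := bInner A k s [] (by simpa using hsk) (hsk ▸ hsnd) idx cnts
      (by intro x; simpa using hidx x)
      (by
        intro i hi
        have : cnts.contains ((i : Int), (k : Int)) = false := by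
          rcases h : cnts.contains ((i : Int), (k : Int)) with _ | _
          · rfl
          · exfalso
            obtain ⟨i', j', he, hij', hj'k, _⟩ := (hcont _).mp h
            have : j' = k := by
              rw [Prod.mk.injEq] at he
              exact_mod_cast he.2.symm
            omega
        simp [PySem.Dict.getD_of_not_contains _ _ this])
      hc
      (by
        intro r
        rw [hcont r]
        constructor
        · exact fun h => Or.inl h
        · rintro (h | ⟨i, hr, hik, hpos⟩)
          · exact h
          · simp at hpos)
      hkeys
    have hbset : bSet ((k : Int), idx, cnts) s
        = ((k : Int) + 1, s.foldl (bElem (k : Int)) (idx, cnts)) := by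
      rfl
    rw [hbset]
    obtain ⟨hi1, hi2, hi3, hi4, hi5⟩ := hinner
    have hcast : ((k : Int) + 1) = ((k + 1 : Nat) : Int) := by push_cast; ring
    rw [hcast]
    have := ihm (k + 1) (by omega)
      ((s.foldl (bElem (k : Int)) (idx, cnts)).1)
      ((s.foldl (bElem (k : Int)) (idx, cnts)).2)
      (by omega)
      (by
        intro x
        rw [hi1 x]
        simp only [pvIdx, List.range_succ, List.filter_append, List.map_append,
          List.filter_cons, List.filter_nil]
        rw [hsk]
        by_cases hxs : x ∈ s <;> simp [hxs])
      (by
        intro i j hij hjk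
        rcases Nat.lt_succ_iff_lt_or_eq.mp hjk with h | rfl
        · exact hi3 i j hij h
        · exact hi2 i hij)
      (by
        intro r
        rw [hi4 r]
        constructor
        · rintro (⟨i, j, hr, hij, hjk, hpos⟩ | ⟨i, hr, hik, hpos⟩)
          · exact ⟨i, j, hr, hij, by omega, hpos⟩
          · exact ⟨i, k, hr, hik, by omega, hpos⟩
        · rintro ⟨i, j, hr, hij, hjk, hpos⟩
          rcases Nat.lt_succ_iff_lt_or_eq.mp hjk with h | rfl
          · exact Or.inl ⟨i, j, hr, hij, h, hpos⟩
          · exact Or.inr ⟨i, hr, hij, hpos⟩)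
      hi5
    simpa using this

lemma length_pvPairs (n : Nat) : (pvPairs n).length = n.choose 2 := by
  induction n with
  | zero => simp [pvPairs]
  | succ m ih =>
    have h : pvPairs (m + 1) = pvPairs m ++ (List.range m).map (fun i => (i, m)) := by
      simp [pvPairs, List.range_succ]
    rw [h, List.length_append, ih]
    simp only [List.length_map, List.length_range]
    rw [Nat.choose_succ_succ, Nat.choose_one_right]
    simp only [show Nat.succ 1 = 2 from rfl]
    omega

-- final characterisation of B
lemma B_char (A : List (List Int)) (hA : ∀ s ∈ A, s.Nodup) :
    overlap_analysis_alt A =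
      [((pvPairs A.length).countP (fun p => pvCnt A p.2 p.1 = 0) : Int),
       ((pvPairs A.length).countP (fun p => pvCnt A p.2 p.1 = 1) : Int),
       ((pvPairs A.length).countP (fun p => pvCnt A p.2 p.1 = 2) : Int)] := by
  obtain ⟨hc, hcont, hkeys⟩ := bOuter A hA 0 PySem.Dict.empty PySem.Dict.empty
    (by omega)
    (by intro x; simp [pvIdx])
    (by intro i j _ h2; omega)
    (by
      intro r
      simp only [PySem.Dict.contains_empty]
      constructor
      · intro h; cases h
      · rintro ⟨i, j, _, _, h, _⟩; omega)
    (by simp [PySem.Dict.keys_empty])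
  rw [show ((0 : Nat) : Int) = (0 : Int) from rfl, List.drop_zero] at hc hcont hkeys
  set n := A.length with hn
  set cnts := (A.foldl bSet ((0 : Int), PySem.Dict.empty, PySem.Dict.empty)).2.2 with hcnts
  -- the keys are exactly the overlapping pairs
  have hinj : Function.Injective
      (fun p : Nat × Nat => (((p.1 : Nat) : Int), ((p.2 : Nat) : Int))) := by
    rintro ⟨a, b⟩ ⟨c, d⟩ h
    rw [Prod.mk.injEq] at h
    have h1 : a = c := by exact_mod_cast h.1
    have h2 : b = d := by exact_mod_cast h.2
    simp [h1, h2]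
  have hperm : cnts.keys.Perm
      (((pvPairs n).filter (fun p => decide (0 < pvCnt A p.2 p.1))).map
        (fun p => (((p.1 : Nat) : Int), ((p.2 : Nat) : Int)))) := by
    refine (List.perm_ext_iff_of_nodup hkeys
      (List.Nodup.map hinj ((nodup_pvPairs n).filter _))).mpr ?_
    intro q
    rw [← PySem.Dict.contains_iff_mem_keys, hcont q]
    simp only [List.mem_map, List.mem_filter, decide_eq_true_eq]
    constructor
    · rintro ⟨i, j, rfl, hij, hjn, hpos⟩
      exact ⟨(i, j), ⟨(mem_pvPairs n (i, j)).mpr ⟨hij, hjn⟩, hpos⟩, rfl⟩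
    · rintro ⟨⟨i, j⟩, ⟨hmem, hpos⟩, rfl⟩
      obtain ⟨hij, hjn⟩ := (mem_pvPairs n (i, j)).mp hmem
      exact ⟨i, j, rfl, hij, hjn, hpos⟩
  have hsize : (PySem.Dict.size cnts : Int)
      = ((pvPairs n).countP (fun p => 0 < pvCnt A p.2 p.1) : Int) := by
    have h1 : PySem.Dict.size cnts = cnts.keys.length := by
      simp [PySem.Dict.size, PySem.Dict.keys]
    rw [h1, hperm.length_eq, List.length_map, ← List.countP_eq_length_filter]
  -- counting values
  have hval : ∀ mN : Nat, 0 < mN →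
      cnts.values.countP (fun c => decide (c = (mN : Int)))
        = (pvPairs n).countP (fun p => pvCnt A p.2 p.1 = mN) := by
    intro mN hm
    rw [PySem.Dict.values_eq_map_keys cnts hkeys 0, List.countP_map,
      List.Perm.countP_eq _ hperm, List.countP_map]
    simp only [Function.comp_def]
    have h1 : ∀ p ∈ (pvPairs n).filter (fun p => decide (0 < pvCnt A p.2 p.1)),
        (decide (cnts.getD (((p.1 : Nat) : Int), ((p.2 : Nat) : Int)) 0 = (mN : Int)) = true)
          ↔ (decide (pvCnt A p.2 p.1 = mN) = true) := by
      intro p hp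
      obtain ⟨hmem, _⟩ := List.mem_filter.mp hp
      obtain ⟨hij, hjn⟩ := (mem_pvPairs n p).mp hmem
      simp only [decide_eq_true_eq]
      rw [hc p.1 p.2 hij hjn]
      exact_mod_cast Iff.rfl
    rw [List.countP_congr h1, List.countP_filter]
    refine List.countP_congr ?_
    intro p _
    simp only [Bool.and_eq_true, decide_eq_true_eq]
    omega
  -- the disjoint count
  have hlen : PySem.Int.floordiv ((n : Int) * ((n : Int) - 1)) 2
      = ((pvPairs n).length : Int) := by
    have h1 : (n : Int) * ((n : Int) - 1) = ((n * (n - 1) : Nat) : Int) := by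
      cases n with
      | zero => simp
      | succ m => push_cast; ring
    rw [h1]
    have h2 := PySem.Int.floordiv_natCast (n * (n - 1)) 2
    have h3 : ((2 : Nat) : Int) = 2 := rfl
    rw [h3] at h2
    rw [h2, length_pvPairs, Nat.choose_two_right]
  have hdisj : PySem.Int.floordiv ((n : Int) * ((n : Int) - 1)) 2
        - (PySem.Dict.size cnts : Int)
      = ((pvPairs n).countP (fun p => pvCnt A p.2 p.1 = 0) : Int) := by
    rw [hlen, hsize]
    have h2 := List.length_eq_countP_add_countP
      (fun p => decide (0 < pvCnt A p.2 p.1)) (l := pvPairs n)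
    have h3 : (pvPairs n).countP
        (fun p => decide ¬(decide (0 < pvCnt A p.2 p.1)) = true)
        = (pvPairs n).countP (fun p => pvCnt A p.2 p.1 = 0) := by
      refine List.countP_congr ?_
      intro p _
      simp only [decide_eq_true_eq]
      omega
    omega
  -- assemble
  simp only [overlap_analysis_alt]
  rw [pairFold]
  simp only [PySem.List.len_eq, ← hcnts, ← hn]
  have hv1 := hval 1 (by omega)
  have hv2 := hval 2 (by omega)
  simp only [Nat.cast_one] at hv1
  simp only [Nat.cast_ofNat] at hv2
  rw [hv1, hv2]
  simp only [zero_add]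
  rw [hdisj]

-- ===== VERDICT (by name: the statement is the Claim_ definition above) =====
theorem overlap_analysis_spec : Claim_equal_overlap_analysis := by
  intro A hdom hpre
  unfold Spec_overlap_analysis
  rw [A_char, B_char A hpre]
  have key : ∀ m : Nat,
      ((pvPairsA A.length).countP (fun p => pvCnt A p.1 p.2 = m))
        = ((pvPairs A.length).countP (fun p => pvCnt A p.2 p.1 = m)) := by
    intro m
    have h1 : ((pvPairsA A.length).countP (fun p => pvCnt A p.1 p.2 = m))
        = ((pvPairsA A.length).countP (fun p => pvCnt A p.2 p.1 = m)) :=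
      List.countP_congr (fun x _ => by simp [pvCnt_symm A hpre x.1 x.2])
    rw [h1]
    exact (pvPairsA_perm A.length).countP_eq _
  simp [key]
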